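-- pv_equiv track=rewrite | github.com/cooknl/AOC2020 | 15/2020-15.py | generate_input_b
-- ===== SOURCE A (Python) =====
-- def generate_input_b(input_data):
--     # Try keeping the VALUES as keys and the indices as values, including 0
--     num_dict = {}
--     for i, n in enumerate(input_data.split(',')):
--         if int(n) in num_dict.keys():
--             num_dict[int(n)] = (num_dict[int(n)][1], i)
--         else:
--             num_dict[int(n)] = (None, i)
--         length = i
--         prev_num = int(n)
--     return num_dict, length, prev_num
-- ===== SOURCE B (Python) =====
-- def generate_input_b(input_data):
--     tokens = input_data.split(',')
--     positions = {}
--     for i, n in enumerate(tokens):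
--         positions.setdefault(int(n), []).append(i)
--     num_dict = {
--         v: ((None, idx[-1]) if len(idx) == 1 else (idx[-2], idx[-1]))
--         for v, idx in positions.items()
--     }
--     return num_dict, len(tokens) - 1, int(tokens[-1])
-- ===== Notes on version B (the rewrite author's own statement) =====
-- stated objective: alternative
-- what changed: Replaces A's single stateful loop (dict updated pair-by-pair while two loop variables leak out) by a group-then-reduce decomposition: one pass groups all indices of each value, a comprehension reduces each group to its last two indices, and length/prev_num are read directly off the token list.
import Mathlib
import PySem

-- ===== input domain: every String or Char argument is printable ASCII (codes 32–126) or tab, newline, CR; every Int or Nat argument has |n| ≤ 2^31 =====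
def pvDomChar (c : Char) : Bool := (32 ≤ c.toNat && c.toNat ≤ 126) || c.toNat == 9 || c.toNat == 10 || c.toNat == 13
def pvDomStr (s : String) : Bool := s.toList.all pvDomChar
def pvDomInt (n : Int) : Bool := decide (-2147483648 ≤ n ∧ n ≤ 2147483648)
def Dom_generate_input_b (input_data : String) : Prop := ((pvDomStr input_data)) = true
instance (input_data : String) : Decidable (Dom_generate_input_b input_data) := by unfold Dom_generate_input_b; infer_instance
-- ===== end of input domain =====

-- B replaces A's single stateful loop by a group-then-reduce decomposition: one pass groups the
-- indices of each value, a second pass keeps each group's last two; length and prev_num come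
-- straight from the token list (objective: alternative).

-- ===== PORT A =====
-- int(n): Pre_ guarantees ofStr? succeeds on every token, so the default is never used
def pvInt (s : String) : Int := (PySem.Int.ofStr? s).getD 0

def generate_input_b (input_data : String) : (List (Int × Option Int × Int)) × Int × Int :=
  let st := (PySem.List.enumerate ((PySem.Str.split? input_data ",").getD [])).foldl
    (fun st p =>
      -- if int(n) in num_dict: num_dict[int(n)] = (num_dict[int(n)][1], i) else: = (None, i)
      (st.1.insert (pvInt p.2) (match st.1.get? (pvInt p.2) with
        | some q => (some q.2, p.1)
        | none   => (none, p.1)),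
       p.1, pvInt p.2))
    ((PySem.Dict.empty : PySem.Dict Int (Option Int × Int)), 0, 0)
  (st.1.items, st.2.1, st.2.2)

-- ===== PORT B =====
def generate_input_b_alt (input_data : String) : (List (Int × Option Int × Int)) × Int × Int :=
  let tokens := (PySem.Str.split? input_data ",").getD []
  -- positions.setdefault(int(n), []).append(i)
  let positions := (PySem.List.enumerate tokens).foldl
    (fun d p => d.modify (pvInt p.2) [] (fun l => l ++ [p.1]))
    (PySem.Dict.empty : PySem.Dict Int (List Int))
  let num_dict := positions.items.map (fun q =>
    (q.1, if q.2.length == 1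
          then ((none : Option Int), PySem.List.pyGetD q.2 (-1) 0)
          else (some (PySem.List.pyGetD q.2 (-2) 0), PySem.List.pyGetD q.2 (-1) 0)))
  (num_dict, (tokens.length : Int) - 1, pvInt (PySem.List.pyGetD tokens (-1) ""))

-- ===== PRECONDITION & SPEC =====
-- Pre_: every comma-separated token parses as a Python int; on any other input Python A
-- raises ValueError at int(n) (in particular the empty string, whose only token is '').
def Pre_generate_input_b (input_data : String) : Prop :=
  ∀ t ∈ (PySem.Str.split? input_data ",").getD [], (PySem.Int.ofStr? t).isSome = true
instance (input_data : String) : Decidable (Pre_generate_input_b input_data) := by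
  unfold Pre_generate_input_b; infer_instance

def pvWitness_generate_input_b : String := "0,3,6,3"

def Spec_generate_input_b (input_data : String) (out : (List (Int × Option Int × Int)) × Int × Int) : Prop := out = generate_input_b_alt input_data
instance (input_data : String) (out : (List (Int × Option Int × Int)) × Int × Int) : Decidable (Spec_generate_input_b input_data out) := by unfold Spec_generate_input_b; infer_instance

-- ===== CLAIM (what is proved, stated in full; the proofs are below) =====
def Claim_equal_generate_input_b : Prop := ∀ (input_data : String), Dom_generate_input_b input_data → Pre_generate_input_b input_data → Spec_generate_input_b input_data (generate_input_b input_data)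

-- ===== LEMMAS AND PROOFS =====

-- A's loop step, over (value, index) pairs
def pvStepA (d : PySem.Dict Int (Option Int × Int)) (q : Int × Int) : PySem.Dict Int (Option Int × Int) :=
  d.insert q.1 (match d.get? q.1 with
    | some r => (some r.2, q.2)
    | none   => (none, q.2))

-- the value A's dict holds at v: the last two of v's index list
def pvLastTwo (idx : List Int) : Option (Option Int × Int) :=
  if idx.isEmpty then none
  else some (PySem.List.pyGet? idx (-2), PySem.List.pyGetD idx (-1) 0)

theorem pvLastTwo_append (idx : List Int) (i : Int) :
    pvLastTwo (idx ++ [i]) = some ((pvLastTwo idx).map (·.2), i) := by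
  cases idx with
  | nil =>
    have h1 : PySem.List.pyGetD ([] ++ [i]) (-1) (0:Int) = i :=
      PySem.List.pyGetD_neg_one_append_singleton [] i 0
    rw [List.nil_append] at h1
    have h2 : PySem.List.pyGet? ([i] : List Int) (-2) = none := by
      rw [PySem.List.pyGet?_eq_none_iff]
      simp [PySem.Raise.InRange]
    simp [pvLastTwo, h1, h2]
  | cons x xs =>
    have hne : x :: xs ≠ [] := by simp
    have h1 : PySem.List.pyGetD ((x :: xs) ++ [i]) (-1) (0:Int) = i :=
      PySem.List.pyGetD_neg_one_append_singleton _ i 0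
    rw [List.cons_append] at h1
    have h2 : PySem.List.pyGet? ((x :: xs) ++ [i]) (-2)
        = some (PySem.List.pyGetD (x :: xs) (-1) 0) := by
      rw [PySem.List.pyGet?_neg_ofNat _ 2 (by omega) (by simp)]
      rw [PySem.List.pyGetD_neg_one _ _ hne]
      have hl : ((x :: xs) ++ [i]).length - 2 = (x :: xs).length - 1 := by simp
      rw [hl]
      rw [List.getElem?_append_left (by simp)]
      rw [← List.getLast?_eq_getElem?]
      exact List.getLast?_eq_some_getLast hne
    rw [List.cons_append] at h2
    simp [pvLastTwo, h1, h2]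

theorem pvGetA (ps : List (Int × Int)) (v : Int) :
    (ps.foldl pvStepA PySem.Dict.empty).get? v
      = pvLastTwo ((ps.filter (·.1 == v)).map (·.2)) := by
  induction ps using List.reverseRecOn with
  | nil => simp [pvLastTwo, PySem.Dict.get?_empty]
  | append_singleton ps q ih =>
    rw [List.foldl_append, List.foldl_cons, List.foldl_nil]
    by_cases hv : v = q.1
    · subst hv
      have hq : List.filter (fun p => p.1 == q.1) [q] = [q] := by simp
      rw [List.filter_append, hq, List.map_append, List.map_cons, List.map_nil]
      rw [pvLastTwo_append]
      show (pvStepA (ps.foldl pvStepA PySem.Dict.empty) q).get? q.1 = _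
      rw [pvStepA, PySem.Dict.get?_insert_self, ih]
      cases pvLastTwo (List.map (fun x => x.2) (List.filter (fun x => x.1 == q.1) ps)) <;> rfl
    · have hne : v ≠ q.1 := hv
      show (pvStepA (ps.foldl pvStepA PySem.Dict.empty) q).get? v = _
      rw [pvStepA, PySem.Dict.get?_insert_of_ne _ _ hne, ih]
      have hnil : List.filter (fun p => p.1 == v) [q] = [] := by
        simp only [List.filter]
        have : (q.1 == v) = false := by
          exact beq_false_of_ne (fun h => hne h.symm)
        rw [this]
      rw [List.filter_append, hnil, List.append_nil]

theorem pvTriple (ps : List (Int × Int))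
    (d : PySem.Dict Int (Option Int × Int)) (a b : Int) :
    ps.foldl (fun st q => (pvStepA st.1 q, q.2, q.1)) (d, a, b)
      = (ps.foldl pvStepA d,
         match ps.getLast? with
         | none => (a, b)
         | some q => (q.2, q.1)) := by
  induction ps generalizing d a b with
  | nil => simp
  | cons q ps ih =>
    rw [List.foldl_cons, List.foldl_cons, ih]
    cases ps with
    | nil => simp
    | cons r rs =>
      rw [List.getLast?_cons_cons]
      cases h : (r :: rs).getLast? with
      | none => simp at h
      | some w => rfl

theorem pvGo_ne_nil (sep : List Char) : ∀ (fuel : Nat) (l cur : List Char) (acc : List (List Char)),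
    PySem.Chars.splitOn.go sep fuel l cur acc ≠ [] := by
  intro fuel
  induction fuel with
  | zero => intro l cur acc; simp [PySem.Chars.splitOn.go]
  | succ n ih =>
    intro l cur acc
    cases l with
    | nil => simp [PySem.Chars.splitOn.go]
    | cons c rest =>
      rw [PySem.Chars.splitOn.go]
      split
      · exact ih _ _ _
      · exact ih _ _ _

theorem pvSplit_ne_nil (s : String) : (PySem.Str.split? s ",").getD [] ≠ [] := by
  have h := PySem.Str.split?_map s ","
  cases hs : PySem.Str.split? s "," with
  | none =>
    rw [hs] at h
    simp [PySem.Chars.split?] at h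
  | some ts =>
    rw [hs] at h
    simp only [Option.map_some] at h
    simp only [Option.getD_some]
    intro hnil
    subst hnil
    have h' := h.symm
    simp [PySem.Chars.split?, PySem.Chars.splitOn] at h'
    exact pvGo_ne_nil _ _ _ _ _ h'

theorem pvCollapse (idx : List Int) (h : idx ≠ []) :
    (if idx.length == 1
     then ((none : Option Int), PySem.List.pyGetD idx (-1) 0)
     else (some (PySem.List.pyGetD idx (-2) 0), PySem.List.pyGetD idx (-1) 0))
    = (PySem.List.pyGet? idx (-2), PySem.List.pyGetD idx (-1) 0) := by
  by_cases h1 : idx.length = 1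
  · rw [if_pos (by simp [h1])]
    have h2 : PySem.List.pyGet? idx (-2) = none := by
      rw [PySem.List.pyGet?_eq_none_iff]
      simp [PySem.Raise.InRange, h1]
    rw [h2]
  · have h2 : 2 ≤ idx.length := by
      have := List.length_pos_iff.mpr h
      omega
    rw [if_neg (by simp [h1])]
    rw [PySem.List.pyGet?_neg_ofNat _ 2 (by omega) h2,
        PySem.List.pyGetD_neg_ofNat _ 2 _ (by omega) h2,
        List.getElem?_eq_getElem (by omega)]

theorem pv_main (s : String) : generate_input_b s = generate_input_b_alt s := by
  have hne : (PySem.Str.split? s ",").getD [] ≠ [] := pvSplit_ne_nil s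
  simp only [generate_input_b, generate_input_b_alt]
  obtain ⟨toks, htoks⟩ : ∃ t : List String, t = (PySem.Str.split? s ",").getD [] := ⟨_, rfl⟩
  rw [← htoks] at hne ⊢
  obtain ⟨ps, hps⟩ : ∃ ps : List (Int × Int), ps = (PySem.List.enumerate toks).map (fun p => (pvInt p.2, p.1)) := ⟨_, rfl⟩
  -- rewrite A's fold
  have hA : (PySem.List.enumerate toks).foldl
      (fun st p =>
        (st.1.insert (pvInt p.2) (match st.1.get? (pvInt p.2) with
          | some q => (some q.2, p.1)
          | none   => (none, p.1)),
         p.1, pvInt p.2))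
      ((PySem.Dict.empty : PySem.Dict Int (Option Int × Int)), 0, 0)
      = ps.foldl (fun st q => (pvStepA st.1 q, q.2, q.1)) (PySem.Dict.empty, 0, 0) := by
    rw [hps, List.foldl_map]
    rfl
  have hB : (PySem.List.enumerate toks).foldl
      (fun d p => d.modify (pvInt p.2) [] (fun l => l ++ [p.1]))
      (PySem.Dict.empty : PySem.Dict Int (List Int))
      = ps.foldl (fun d q => d.modify q.1 [] (fun l => l ++ [q.2])) PySem.Dict.empty := by
    rw [hps, List.foldl_map]
  rw [hA, hB, pvTriple]
  -- A's dict
  have hKA : (ps.foldl pvStepA PySem.Dict.empty).keys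
      = PySem.Set.ofList (ps.map (fun q => q.1)) := by
    have h := PySem.Dict.keys_foldl_insert_key ps (fun q => q.1)
      (fun (d : PySem.Dict Int (Option Int × Int)) (q : Int × Int) => match d.get? q.1 with
        | some r => (some r.2, q.2)
        | none   => (none, q.2)) PySem.Dict.empty
    rw [PySem.Dict.keys_empty, PySem.Set.update_nil_left] at h
    exact h
  have hNA : (ps.foldl pvStepA PySem.Dict.empty).keys.Nodup := by
    have h := PySem.Dict.nodup_keys_foldl_insert_key ps (fun q => q.1)
      (fun (d : PySem.Dict Int (Option Int × Int)) (q : Int × Int) => match d.get? q.1 with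
        | some r => (some r.2, q.2)
        | none   => (none, q.2)) PySem.Dict.empty (by rw [PySem.Dict.keys_empty]; exact List.nodup_nil)
    exact h
  have hKP : (ps.foldl (fun d q => d.modify q.1 [] (fun l => l ++ [q.2])) PySem.Dict.empty).keys
      = PySem.Set.ofList (ps.map (fun q => q.1)) := by
    have h := PySem.Dict.keys_foldl_modify_key ps (fun q => q.1) []
      (fun _ q l => l ++ [q.2]) PySem.Dict.empty
    rw [PySem.Dict.keys_empty, PySem.Set.update_nil_left] at h
    exact h
  have hNP : (ps.foldl (fun d q => d.modify q.1 [] (fun l => l ++ [q.2])) PySem.Dict.empty).keys.Nodup := by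
    have h := PySem.Dict.nodup_keys_foldl_modify_key ps (fun q => q.1) []
      (fun _ q l => l ++ [q.2]) PySem.Dict.empty (by rw [PySem.Dict.keys_empty]; exact List.nodup_nil)
    exact h
  have hGP : ∀ k : Int, (ps.foldl (fun d q => d.modify q.1 [] (fun l => l ++ [q.2])) PySem.Dict.empty).getD k []
      = (ps.filter (fun q => q.1 == k)).map (fun q => q.2) := by
    intro k
    have h := PySem.Dict.getD_foldl_modify_append ps PySem.Dict.empty k
    rw [h]
    simp [PySem.Dict.getD_eq_get?_getD, PySem.Dict.get?_empty]
  have hLast : ps.getLast? = some (pvInt (toks.getLast hne), ((toks.length - 1 : Nat) : Int)) := by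
    rw [hps, List.getLast?_map, List.getLast?_eq_getElem?, PySem.List.length_enumerate,
        PySem.List.getElem?_enumerate]
    have h1 : 1 ≤ toks.length := List.length_pos_iff.mpr hne
    have h2 : toks[toks.length - 1]? = some (toks.getLast hne) := by
      rw [← List.getLast?_eq_getElem?]
      exact List.getLast?_eq_some_getLast hne
    rw [h2]
    simp
  simp only [Prod.mk.injEq]
  refine ⟨?_, ?_, ?_⟩
  · -- items
    rw [PySem.Dict.items_eq_map_keys _ hNA ((none : Option Int), (0:Int)),
        PySem.Dict.items_eq_map_keys _ hNP []]
    rw [hKA, hKP, List.map_map]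
    apply List.map_congr_left
    intro k hk
    have hkmem : k ∈ ps.map (fun q => q.1) := (PySem.Set.mem_ofList _ _).mp hk
    have hidx : (ps.filter (fun q => q.1 == k)).map (fun q => q.2) ≠ [] := by
      rcases List.mem_map.mp hkmem with ⟨q, hq, hqk⟩
      have : q ∈ ps.filter (fun q => q.1 == k) :=
        List.mem_filter.mpr ⟨hq, by simp [hqk]⟩
      intro hcon
      rw [List.map_eq_nil_iff] at hcon
      rw [hcon] at this
      exact absurd this (List.not_mem_nil)
    have hget : (ps.foldl pvStepA PySem.Dict.empty).getD k ((none : Option Int), (0:Int))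
        = (PySem.List.pyGet? ((ps.filter (fun q => q.1 == k)).map (fun q => q.2)) (-2),
           PySem.List.pyGetD ((ps.filter (fun q => q.1 == k)).map (fun q => q.2)) (-1) 0) := by
      rw [PySem.Dict.getD_eq_get?_getD, pvGetA, pvLastTwo,
          if_neg (by simpa using hidx)]
      rfl
    simp only [Function.comp_apply]
    rw [hget, hGP k, pvCollapse _ hidx]
  · -- length
    rw [hLast]
    have h1 : 1 ≤ toks.length := List.length_pos_iff.mpr hne
    push_cast [Nat.cast_sub h1]
    ring
  · -- prev
    rw [hLast, PySem.List.pyGetD_neg_one _ _ hne]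

-- ===== VERDICT (by name: the statement is the Claim_ definition above) =====
theorem generate_input_b_spec : Claim_equal_generate_input_b := by
  intro input_data _ _
  unfold Spec_generate_input_b
  exact pv_main input_data
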